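-- pv_equiv track=rewrite | github.com/AshrithSagar/MBM-Project-Epic | budeAlaScan/budeAlaScan/myutils/misce.py | convert_aa
-- ===== SOURCE A (Python) =====
-- def convert_aa(amino, want_longer=False):
--
--     """
--     Convert Amino Acids into 3-letter code, 1-letter code or name
--     from either the 3-letter code, 1-letter code or name.
--
--     want_longer will determine if we want to return the name instead of
--     the 3-letter code for a given 1-letter code aa or if we get
--     the 3-letter instead of the 1-letter code for a given name.
--
--     ie: convert_aa('A', False) -> 'ALA'
--         convert_aa('A', True)  -> 'Alanine'
--
--         convert_aa('ALA', False) -> 'A'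
--         convert_aa('ALA', True)  -> 'Alanine'
--
--         convert_aa('Alanine', False) -> 'A'
--         convert_aa('Alanine', True)  -> 'ALA'
--
--
--
--     amino -- Name or code to convert.
--     want_longer -- If we want the longer representation of the amino acid.
--
--     Returns the converted representation of amino, None if amino is not found.
--     """
--
--     up_amino = amino.upper()
--
--     amino_acids = {
--     "ALA":{"A":"Alanine"},
--     "CYS":{"C":"Cysteine"},
--     "ASP":{"D":"Aspartic Acid"},
--     "GLU":{"E":"Glutamic Acid"},
--     "PHE":{"F":"Phenylalanine"},
--     "GLY":{"G":"Glycine"},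
--     "HIS":{"H":"Histidine"},
--     "ILE":{"I":"Isoleucine"},
--     "LYS":{"K":"Lysine"},
--     "LEU":{"L":"Leucine"},
--     "MET":{"M":"Methionine"},
--     "ASN":{"N":"Asparagine"},
--     "PRO":{"P":"Proline"},
--     "GLN":{"Q":"Glutamine"},
--     "ARG":{"R":"Arginine"},
--     "SER":{"S":"Serine"},
--     "THR":{"T":"Threonine"},
--     "VAL":{"V":"Valine"},
--     "TRP":{"W":"Tryptophan"},
--     "TYR":{"Y":"Tyrosine"},
--     "SEC":{"U":"Selenocysteine"}
--     }
--
--     if len(amino) == 1: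
--         for char3_code in amino_acids:
--             char1_code = list(amino_acids[char3_code].keys())[0]
--
--             if char1_code == up_amino and want_longer:
--                 return amino_acids[char3_code][char1_code]
--             elif char1_code == up_amino and not want_longer:
--                 return  char3_code
--         return None
--     elif len(amino) == 3:
--         if up_amino in amino_acids:
--             char1_code = list(amino_acids[up_amino].keys())[0]
--             if want_longer:
--                 return amino_acids[up_amino][char1_code]
--             else:
--                 return char1_code
--         else:
--             return None
--     else:
--         for char3_code in amino_acids:
--             for char1_code in amino_acids[char3_code]:
--                 up_name = amino_acids[char3_code][char1_code].upper()
--                 if up_amino == up_name and want_longer: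
--                     return char3_code
--                 elif up_amino == up_name and not want_longer:
--                     return char1_code
--     return None
-- ===== SOURCE B (Python) =====
-- _AMINO_TABLE = [
--     ("ALA", "A", "Alanine"),
--     ("CYS", "C", "Cysteine"),
--     ("ASP", "D", "Aspartic Acid"),
--     ("GLU", "E", "Glutamic Acid"),
--     ("PHE", "F", "Phenylalanine"),
--     ("GLY", "G", "Glycine"),
--     ("HIS", "H", "Histidine"),
--     ("ILE", "I", "Isoleucine"),
--     ("LYS", "K", "Lysine"),
--     ("LEU", "L", "Leucine"),
--     ("MET", "M", "Methionine"),
--     ("ASN", "N", "Asparagine"),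
--     ("PRO", "P", "Proline"),
--     ("GLN", "Q", "Glutamine"),
--     ("ARG", "R", "Arginine"),
--     ("SER", "S", "Serine"),
--     ("THR", "T", "Threonine"),
--     ("VAL", "V", "Valine"),
--     ("TRP", "W", "Tryptophan"),
--     ("TYR", "Y", "Tyrosine"),
--     ("SEC", "U", "Selenocysteine"),
-- ]
--
-- _ONE_TO_THREE = {one: three for three, one, _name in _AMINO_TABLE}
-- _ONE_TO_NAME = {one: name for _three, one, name in _AMINO_TABLE}
-- _THREE_TO_ONE = {three: one for three, one, _name in _AMINO_TABLE}
-- _THREE_TO_NAME = {three: name for three, _one, name in _AMINO_TABLE}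
-- _NAME_TO_ONE = {name.upper(): one for _three, one, name in _AMINO_TABLE}
-- _NAME_TO_THREE = {name.upper(): three for three, _one, name in _AMINO_TABLE}
--
--
-- def convert_aa(amino, want_longer=False):
--     up_amino = amino.upper()
--     if len(amino) == 1:
--         table = _ONE_TO_NAME if want_longer else _ONE_TO_THREE
--     elif len(amino) == 3:
--         table = _THREE_TO_NAME if want_longer else _THREE_TO_ONE
--     else:
--         table = _NAME_TO_THREE if want_longer else _NAME_TO_ONE
--     return table.get(up_amino)
-- ===== Notes on version B (the rewrite author's own statement) =====
-- stated objective: idiomatic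
-- what changed: Replaces A's per-call linear scans over a nested dict (and a scan per branch) with six reverse-lookup dictionaries precomputed once from a flat (three, one, name) table, so each call is the same length-based dispatch followed by a single dict .get.
import Mathlib
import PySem

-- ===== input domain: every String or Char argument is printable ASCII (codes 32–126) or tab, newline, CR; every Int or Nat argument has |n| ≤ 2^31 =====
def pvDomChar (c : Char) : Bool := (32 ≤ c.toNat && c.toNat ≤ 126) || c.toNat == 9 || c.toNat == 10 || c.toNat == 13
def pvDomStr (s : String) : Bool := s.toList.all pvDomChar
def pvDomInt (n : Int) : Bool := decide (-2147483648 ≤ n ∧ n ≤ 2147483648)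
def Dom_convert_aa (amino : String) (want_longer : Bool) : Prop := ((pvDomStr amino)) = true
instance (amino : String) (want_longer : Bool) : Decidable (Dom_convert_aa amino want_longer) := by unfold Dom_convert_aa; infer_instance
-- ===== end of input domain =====

-- B replaces A's per-call linear scans of the amino-acid table by six reverse-lookup
-- dictionaries built once from a flat table, so each call is a single dict lookup (objective: idiomatic).

-- ===== PORT A =====
-- the nested dict literal from A
def aminoAcidsA : PySem.Dict String (PySem.Dict String String) := PySem.Dict.mk [
  ("ALA", PySem.Dict.mk [("A", "Alanine")]),
  ("CYS", PySem.Dict.mk [("C", "Cysteine")]),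
  ("ASP", PySem.Dict.mk [("D", "Aspartic Acid")]),
  ("GLU", PySem.Dict.mk [("E", "Glutamic Acid")]),
  ("PHE", PySem.Dict.mk [("F", "Phenylalanine")]),
  ("GLY", PySem.Dict.mk [("G", "Glycine")]),
  ("HIS", PySem.Dict.mk [("H", "Histidine")]),
  ("ILE", PySem.Dict.mk [("I", "Isoleucine")]),
  ("LYS", PySem.Dict.mk [("K", "Lysine")]),
  ("LEU", PySem.Dict.mk [("L", "Leucine")]),
  ("MET", PySem.Dict.mk [("M", "Methionine")]),
  ("ASN", PySem.Dict.mk [("N", "Asparagine")]),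
  ("PRO", PySem.Dict.mk [("P", "Proline")]),
  ("GLN", PySem.Dict.mk [("Q", "Glutamine")]),
  ("ARG", PySem.Dict.mk [("R", "Arginine")]),
  ("SER", PySem.Dict.mk [("S", "Serine")]),
  ("THR", PySem.Dict.mk [("T", "Threonine")]),
  ("VAL", PySem.Dict.mk [("V", "Valine")]),
  ("TRP", PySem.Dict.mk [("W", "Tryptophan")]),
  ("TYR", PySem.Dict.mk [("Y", "Tyrosine")]),
  ("SEC", PySem.Dict.mk [("U", "Selenocysteine")])]

-- A's len==1 loop: 'for char3_code in amino_acids: char1_code = list(...keys())[0]; …'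
-- list(keys())[0] is ported as pyGetD … 0 "": the inner dicts of the literal table are never empty,
-- so the "" default is never used and Python's would-be IndexError is unreachable.
def loopOneA (up : String) (wl : Bool) : List (String × PySem.Dict String String) → Option String
  | [] => none
  | (c3, inner) :: rest =>
    let c1 := PySem.List.pyGetD (PySem.Dict.keys inner) 0 ""
    if c1 == up && wl then PySem.Dict.get? inner c1
    else if c1 == up && !wl then some c3
    else loopOneA up wl rest

-- A's else-branch inner loop: 'for char1_code in amino_acids[char3_code]: …'
def loopNameInnerA (up : String) (wl : Bool) (c3 : String) : List (String × String) → Option String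
  | [] => none
  | (c1, name) :: rest =>
    let upName := PySem.Str.upper name
    if up == upName && wl then some c3
    else if up == upName && !wl then some c1
    else loopNameInnerA up wl c3 rest

-- A's else-branch outer loop
def loopNameA (up : String) (wl : Bool) : List (String × PySem.Dict String String) → Option String
  | [] => none
  | (c3, inner) :: rest =>
    match loopNameInnerA up wl c3 inner.items with
    | some r => some r
    | none => loopNameA up wl rest

def convert_aa (amino : String) (want_longer : Bool) : Option String :=
  let up_amino := PySem.Str.upper amino
  if PySem.Str.len amino == 1 then
    loopOneA up_amino want_longer aminoAcidsA.items
  else if PySem.Str.len amino == 3 then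
    -- 'if up_amino in amino_acids: …' — contains = get? isSome, and the value is used right after
    match PySem.Dict.get? aminoAcidsA up_amino with
    | some inner =>
      let c1 := PySem.List.pyGetD (PySem.Dict.keys inner) 0 ""
      if want_longer then PySem.Dict.get? inner c1 else some c1
    | none => none
  else
    loopNameA up_amino want_longer aminoAcidsA.items

-- ===== PORT B =====
def aminoTableB : List (String × String × String) := [
  ("ALA", "A", "Alanine"),
  ("CYS", "C", "Cysteine"),
  ("ASP", "D", "Aspartic Acid"),
  ("GLU", "E", "Glutamic Acid"),
  ("PHE", "F", "Phenylalanine"),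
  ("GLY", "G", "Glycine"),
  ("HIS", "H", "Histidine"),
  ("ILE", "I", "Isoleucine"),
  ("LYS", "K", "Lysine"),
  ("LEU", "L", "Leucine"),
  ("MET", "M", "Methionine"),
  ("ASN", "N", "Asparagine"),
  ("PRO", "P", "Proline"),
  ("GLN", "Q", "Glutamine"),
  ("ARG", "R", "Arginine"),
  ("SER", "S", "Serine"),
  ("THR", "T", "Threonine"),
  ("VAL", "V", "Valine"),
  ("TRP", "W", "Tryptophan"),
  ("TYR", "Y", "Tyrosine"),
  ("SEC", "U", "Selenocysteine")]

-- the six dict comprehensions of Source B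
def oneToThreeB : PySem.Dict String String := PySem.Dict.ofList (aminoTableB.map fun t => (t.2.1, t.1))
def oneToNameB : PySem.Dict String String := PySem.Dict.ofList (aminoTableB.map fun t => (t.2.1, t.2.2))
def threeToOneB : PySem.Dict String String := PySem.Dict.ofList (aminoTableB.map fun t => (t.1, t.2.1))
def threeToNameB : PySem.Dict String String := PySem.Dict.ofList (aminoTableB.map fun t => (t.1, t.2.2))
def nameToOneB : PySem.Dict String String := PySem.Dict.ofList (aminoTableB.map fun t => (PySem.Str.upper t.2.2, t.2.1))
def nameToThreeB : PySem.Dict String String := PySem.Dict.ofList (aminoTableB.map fun t => (PySem.Str.upper t.2.2, t.1))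

def convert_aa_alt (amino : String) (want_longer : Bool) : Option String :=
  let up_amino := PySem.Str.upper amino
  let table :=
    if PySem.Str.len amino == 1 then
      (if want_longer then oneToNameB else oneToThreeB)
    else if PySem.Str.len amino == 3 then
      (if want_longer then threeToNameB else threeToOneB)
    else
      (if want_longer then nameToThreeB else nameToOneB)
  PySem.Dict.get? table up_amino

-- ===== PRECONDITION & SPEC =====
def Spec_convert_aa (amino : String) (want_longer : Bool) (out : Option String) : Prop := out = convert_aa_alt amino want_longer
instance (amino : String) (want_longer : Bool) (out : Option String) : Decidable (Spec_convert_aa amino want_longer out) := by unfold Spec_convert_aa; infer_instance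

-- ===== CLAIM (what is proved, stated in full; the proofs are below) =====
def Claim_equal_convert_aa : Prop := ∀ (amino : String) (want_longer : Bool), Dom_convert_aa amino want_longer → Spec_convert_aa amino want_longer (convert_aa amino want_longer)

-- ===== LEMMAS AND PROOFS =====

-- evaluated forms of B's comprehension-built dicts and of upper() on the table's names (all by rfl)
lemma oneToThreeB_eval : oneToThreeB = PySem.Dict.mk [("A", "ALA"), ("C", "CYS"), ("D", "ASP"), ("E", "GLU"), ("F", "PHE"), ("G", "GLY"), ("H", "HIS"), ("I", "ILE"), ("K", "LYS"), ("L", "LEU"), ("M", "MET"), ("N", "ASN"), ("P", "PRO"), ("Q", "GLN"), ("R", "ARG"), ("S", "SER"), ("T", "THR"), ("V", "VAL"), ("W", "TRP"), ("Y", "TYR"), ("U", "SEC")] := rfl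
lemma oneToNameB_eval : oneToNameB = PySem.Dict.mk [("A", "Alanine"), ("C", "Cysteine"), ("D", "Aspartic Acid"), ("E", "Glutamic Acid"), ("F", "Phenylalanine"), ("G", "Glycine"), ("H", "Histidine"), ("I", "Isoleucine"), ("K", "Lysine"), ("L", "Leucine"), ("M", "Methionine"), ("N", "Asparagine"), ("P", "Proline"), ("Q", "Glutamine"), ("R", "Arginine"), ("S", "Serine"), ("T", "Threonine"), ("V", "Valine"), ("W", "Tryptophan"), ("Y", "Tyrosine"), ("U", "Selenocysteine")] := rfl
lemma threeToOneB_eval : threeToOneB = PySem.Dict.mk [("ALA", "A"), ("CYS", "C"), ("ASP", "D"), ("GLU", "E"), ("PHE", "F"), ("GLY", "G"), ("HIS", "H"), ("ILE", "I"), ("LYS", "K"), ("LEU", "L"), ("MET", "M"), ("ASN", "N"), ("PRO", "P"), ("GLN", "Q"), ("ARG", "R"), ("SER", "S"), ("THR", "T"), ("VAL", "V"), ("TRP", "W"), ("TYR", "Y"), ("SEC", "U")] := rfl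
lemma threeToNameB_eval : threeToNameB = PySem.Dict.mk [("ALA", "Alanine"), ("CYS", "Cysteine"), ("ASP", "Aspartic Acid"), ("GLU", "Glutamic Acid"), ("PHE", "Phenylalanine"), ("GLY", "Glycine"), ("HIS", "Histidine"), ("ILE", "Isoleucine"), ("LYS", "Lysine"), ("LEU", "Leucine"), ("MET", "Methionine"), ("ASN", "Asparagine"), ("PRO", "Proline"), ("GLN", "Glutamine"), ("ARG", "Arginine"), ("SER", "Serine"), ("THR", "Threonine"), ("VAL", "Valine"), ("TRP", "Tryptophan"), ("TYR", "Tyrosine"), ("SEC", "Selenocysteine")] := rfl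
lemma nameToOneB_eval : nameToOneB = PySem.Dict.mk [("ALANINE", "A"), ("CYSTEINE", "C"), ("ASPARTIC ACID", "D"), ("GLUTAMIC ACID", "E"), ("PHENYLALANINE", "F"), ("GLYCINE", "G"), ("HISTIDINE", "H"), ("ISOLEUCINE", "I"), ("LYSINE", "K"), ("LEUCINE", "L"), ("METHIONINE", "M"), ("ASPARAGINE", "N"), ("PROLINE", "P"), ("GLUTAMINE", "Q"), ("ARGININE", "R"), ("SERINE", "S"), ("THREONINE", "T"), ("VALINE", "V"), ("TRYPTOPHAN", "W"), ("TYROSINE", "Y"), ("SELENOCYSTEINE", "U")] := rfl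
lemma nameToThreeB_eval : nameToThreeB = PySem.Dict.mk [("ALANINE", "ALA"), ("CYSTEINE", "CYS"), ("ASPARTIC ACID", "ASP"), ("GLUTAMIC ACID", "GLU"), ("PHENYLALANINE", "PHE"), ("GLYCINE", "GLY"), ("HISTIDINE", "HIS"), ("ISOLEUCINE", "ILE"), ("LYSINE", "LYS"), ("LEUCINE", "LEU"), ("METHIONINE", "MET"), ("ASPARAGINE", "ASN"), ("PROLINE", "PRO"), ("GLUTAMINE", "GLN"), ("ARGININE", "ARG"), ("SERINE", "SER"), ("THREONINE", "THR"), ("VALINE", "VAL"), ("TRYPTOPHAN", "TRP"), ("TYROSINE", "TYR"), ("SELENOCYSTEINE", "SEC")] := rfl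
lemma upName0 : PySem.Str.upper "Alanine" = "ALANINE" := rfl
lemma upName1 : PySem.Str.upper "Cysteine" = "CYSTEINE" := rfl
lemma upName2 : PySem.Str.upper "Aspartic Acid" = "ASPARTIC ACID" := rfl
lemma upName3 : PySem.Str.upper "Glutamic Acid" = "GLUTAMIC ACID" := rfl
lemma upName4 : PySem.Str.upper "Phenylalanine" = "PHENYLALANINE" := rfl
lemma upName5 : PySem.Str.upper "Glycine" = "GLYCINE" := rfl
lemma upName6 : PySem.Str.upper "Histidine" = "HISTIDINE" := rfl
lemma upName7 : PySem.Str.upper "Isoleucine" = "ISOLEUCINE" := rfl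
lemma upName8 : PySem.Str.upper "Lysine" = "LYSINE" := rfl
lemma upName9 : PySem.Str.upper "Leucine" = "LEUCINE" := rfl
lemma upName10 : PySem.Str.upper "Methionine" = "METHIONINE" := rfl
lemma upName11 : PySem.Str.upper "Asparagine" = "ASPARAGINE" := rfl
lemma upName12 : PySem.Str.upper "Proline" = "PROLINE" := rfl
lemma upName13 : PySem.Str.upper "Glutamine" = "GLUTAMINE" := rfl
lemma upName14 : PySem.Str.upper "Arginine" = "ARGININE" := rfl
lemma upName15 : PySem.Str.upper "Serine" = "SERINE" := rfl
lemma upName16 : PySem.Str.upper "Threonine" = "THREONINE" := rfl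
lemma upName17 : PySem.Str.upper "Valine" = "VALINE" := rfl
lemma upName18 : PySem.Str.upper "Tryptophan" = "TRYPTOPHAN" := rfl
lemma upName19 : PySem.Str.upper "Tyrosine" = "TYROSINE" := rfl
lemma upName20 : PySem.Str.upper "Selenocysteine" = "SELENOCYSTEINE" := rfl

lemma dictNilGet (x : String) : (PySem.Dict.mk ([] : List (String × String))).get? x = none := rfl

set_option maxRecDepth 8192 in
lemma loopOneA_eq (up : String) (wl : Bool) :
    loopOneA up wl aminoAcidsA.items
      = PySem.Dict.get? (if wl then oneToNameB else oneToThreeB) up := by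
  cases wl <;>
    simp [loopOneA, aminoAcidsA, oneToNameB_eval, oneToThreeB_eval,
      PySem.Dict.get?_mk_cons, dictNilGet, PySem.Dict.keys, PySem.List.pyGetD]

set_option maxRecDepth 8192 in
set_option maxHeartbeats 2000000 in
lemma three_eq (up : String) (wl : Bool) :
    (match PySem.Dict.get? aminoAcidsA up with
     | some inner =>
       let c1 := PySem.List.pyGetD (PySem.Dict.keys inner) 0 ""
       if wl then PySem.Dict.get? inner c1 else some c1
     | none => none)
      = PySem.Dict.get? (if wl then threeToNameB else threeToOneB) up := by
  have dictNilGet' (x : String) :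
      (PySem.Dict.mk ([] : List (String × PySem.Dict String String))).get? x = none := rfl
  cases wl
  case false =>
    by_cases h0 : "ALA" = up
    · subst h0; rfl
    by_cases h1 : "CYS" = up
    · subst h1; rfl
    by_cases h2 : "ASP" = up
    · subst h2; rfl
    by_cases h3 : "GLU" = up
    · subst h3; rfl
    by_cases h4 : "PHE" = up
    · subst h4; rfl
    by_cases h5 : "GLY" = up
    · subst h5; rfl
    by_cases h6 : "HIS" = up
    · subst h6; rfl
    by_cases h7 : "ILE" = up
    · subst h7; rfl
    by_cases h8 : "LYS" = up
    · subst h8; rfl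
    by_cases h9 : "LEU" = up
    · subst h9; rfl
    by_cases h10 : "MET" = up
    · subst h10; rfl
    by_cases h11 : "ASN" = up
    · subst h11; rfl
    by_cases h12 : "PRO" = up
    · subst h12; rfl
    by_cases h13 : "GLN" = up
    · subst h13; rfl
    by_cases h14 : "ARG" = up
    · subst h14; rfl
    by_cases h15 : "SER" = up
    · subst h15; rfl
    by_cases h16 : "THR" = up
    · subst h16; rfl
    by_cases h17 : "VAL" = up
    · subst h17; rfl
    by_cases h18 : "TRP" = up
    · subst h18; rfl
    by_cases h19 : "TYR" = up
    · subst h19; rfl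
    by_cases h20 : "SEC" = up
    · subst h20; rfl
    simp [aminoAcidsA, threeToNameB_eval, threeToOneB_eval, PySem.Dict.get?_mk_cons, dictNilGet, dictNilGet', h0, h1, h2, h3, h4, h5, h6, h7, h8, h9, h10, h11, h12, h13, h14, h15, h16, h17, h18, h19, h20]
  case true =>
    by_cases h0 : "ALA" = up
    · subst h0; rfl
    by_cases h1 : "CYS" = up
    · subst h1; rfl
    by_cases h2 : "ASP" = up
    · subst h2; rfl
    by_cases h3 : "GLU" = up
    · subst h3; rfl
    by_cases h4 : "PHE" = up
    · subst h4; rfl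
    by_cases h5 : "GLY" = up
    · subst h5; rfl
    by_cases h6 : "HIS" = up
    · subst h6; rfl
    by_cases h7 : "ILE" = up
    · subst h7; rfl
    by_cases h8 : "LYS" = up
    · subst h8; rfl
    by_cases h9 : "LEU" = up
    · subst h9; rfl
    by_cases h10 : "MET" = up
    · subst h10; rfl
    by_cases h11 : "ASN" = up
    · subst h11; rfl
    by_cases h12 : "PRO" = up
    · subst h12; rfl
    by_cases h13 : "GLN" = up
    · subst h13; rfl
    by_cases h14 : "ARG" = up
    · subst h14; rfl
    by_cases h15 : "SER" = up
    · subst h15; rfl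
    by_cases h16 : "THR" = up
    · subst h16; rfl
    by_cases h17 : "VAL" = up
    · subst h17; rfl
    by_cases h18 : "TRP" = up
    · subst h18; rfl
    by_cases h19 : "TYR" = up
    · subst h19; rfl
    by_cases h20 : "SEC" = up
    · subst h20; rfl
    simp [aminoAcidsA, threeToNameB_eval, threeToOneB_eval, PySem.Dict.get?_mk_cons, dictNilGet, dictNilGet', h0, h1, h2, h3, h4, h5, h6, h7, h8, h9, h10, h11, h12, h13, h14, h15, h16, h17, h18, h19, h20]

set_option maxRecDepth 8192 in
set_option maxHeartbeats 2000000 in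
lemma loopNameA_eq (up : String) (wl : Bool) :
    loopNameA up wl aminoAcidsA.items
      = PySem.Dict.get? (if wl then nameToThreeB else nameToOneB) up := by
  cases wl
  case false =>
    by_cases h0 : "ALANINE" = up
    · subst h0; rfl
    by_cases h1 : "CYSTEINE" = up
    · subst h1; rfl
    by_cases h2 : "ASPARTIC ACID" = up
    · subst h2; rfl
    by_cases h3 : "GLUTAMIC ACID" = up
    · subst h3; rfl
    by_cases h4 : "PHENYLALANINE" = up
    · subst h4; rfl
    by_cases h5 : "GLYCINE" = up
    · subst h5; rfl
    by_cases h6 : "HISTIDINE" = up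
    · subst h6; rfl
    by_cases h7 : "ISOLEUCINE" = up
    · subst h7; rfl
    by_cases h8 : "LYSINE" = up
    · subst h8; rfl
    by_cases h9 : "LEUCINE" = up
    · subst h9; rfl
    by_cases h10 : "METHIONINE" = up
    · subst h10; rfl
    by_cases h11 : "ASPARAGINE" = up
    · subst h11; rfl
    by_cases h12 : "PROLINE" = up
    · subst h12; rfl
    by_cases h13 : "GLUTAMINE" = up
    · subst h13; rfl
    by_cases h14 : "ARGININE" = up
    · subst h14; rfl
    by_cases h15 : "SERINE" = up
    · subst h15; rfl
    by_cases h16 : "THREONINE" = up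
    · subst h16; rfl
    by_cases h17 : "VALINE" = up
    · subst h17; rfl
    by_cases h18 : "TRYPTOPHAN" = up
    · subst h18; rfl
    by_cases h19 : "TYROSINE" = up
    · subst h19; rfl
    by_cases h20 : "SELENOCYSTEINE" = up
    · subst h20; rfl
    simp [loopNameA, loopNameInnerA, aminoAcidsA, nameToThreeB_eval, nameToOneB_eval, upName0, upName1, upName2, upName3, upName4, upName5, upName6, upName7, upName8, upName9, upName10, upName11, upName12, upName13, upName14, upName15, upName16, upName17, upName18, upName19, upName20, PySem.Dict.get?_mk_cons, dictNilGet, h0, h1, h2, h3, h4, h5, h6, h7, h8, h9, h10, h11, h12, h13, h14, h15, h16, h17, h18, h19, h20, Ne.symm h0, Ne.symm h1, Ne.symm h2, Ne.symm h3, Ne.symm h4, Ne.symm h5, Ne.symm h6, Ne.symm h7, Ne.symm h8, Ne.symm h9, Ne.symm h10, Ne.symm h11, Ne.symm h12, Ne.symm h13, Ne.symm h14, Ne.symm h15, Ne.symm h16, Ne.symm h17, Ne.symm h18, Ne.symm h19, Ne.symm h20]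
  case true =>
    by_cases h0 : "ALANINE" = up
    · subst h0; rfl
    by_cases h1 : "CYSTEINE" = up
    · subst h1; rfl
    by_cases h2 : "ASPARTIC ACID" = up
    · subst h2; rfl
    by_cases h3 : "GLUTAMIC ACID" = up
    · subst h3; rfl
    by_cases h4 : "PHENYLALANINE" = up
    · subst h4; rfl
    by_cases h5 : "GLYCINE" = up
    · subst h5; rfl
    by_cases h6 : "HISTIDINE" = up
    · subst h6; rfl
    by_cases h7 : "ISOLEUCINE" = up
    · subst h7; rfl
    by_cases h8 : "LYSINE" = up
    · subst h8; rfl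
    by_cases h9 : "LEUCINE" = up
    · subst h9; rfl
    by_cases h10 : "METHIONINE" = up
    · subst h10; rfl
    by_cases h11 : "ASPARAGINE" = up
    · subst h11; rfl
    by_cases h12 : "PROLINE" = up
    · subst h12; rfl
    by_cases h13 : "GLUTAMINE" = up
    · subst h13; rfl
    by_cases h14 : "ARGININE" = up
    · subst h14; rfl
    by_cases h15 : "SERINE" = up
    · subst h15; rfl
    by_cases h16 : "THREONINE" = up
    · subst h16; rfl
    by_cases h17 : "VALINE" = up
    · subst h17; rfl
    by_cases h18 : "TRYPTOPHAN" = up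
    · subst h18; rfl
    by_cases h19 : "TYROSINE" = up
    · subst h19; rfl
    by_cases h20 : "SELENOCYSTEINE" = up
    · subst h20; rfl
    simp [loopNameA, loopNameInnerA, aminoAcidsA, nameToThreeB_eval, nameToOneB_eval, upName0, upName1, upName2, upName3, upName4, upName5, upName6, upName7, upName8, upName9, upName10, upName11, upName12, upName13, upName14, upName15, upName16, upName17, upName18, upName19, upName20, PySem.Dict.get?_mk_cons, dictNilGet, h0, h1, h2, h3, h4, h5, h6, h7, h8, h9, h10, h11, h12, h13, h14, h15, h16, h17, h18, h19, h20, Ne.symm h0, Ne.symm h1, Ne.symm h2, Ne.symm h3, Ne.symm h4, Ne.symm h5, Ne.symm h6, Ne.symm h7, Ne.symm h8, Ne.symm h9, Ne.symm h10, Ne.symm h11, Ne.symm h12, Ne.symm h13, Ne.symm h14, Ne.symm h15, Ne.symm h16, Ne.symm h17, Ne.symm h18, Ne.symm h19, Ne.symm h20]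

-- ===== VERDICT (by name: the statement is the Claim_ definition above) =====
theorem convert_aa_spec : Claim_equal_convert_aa := by
  intro amino want_longer _
  unfold Spec_convert_aa convert_aa convert_aa_alt
  by_cases h1 : amino.length = 1
  · simp [h1, loopOneA_eq]
  · by_cases h3 : amino.length = 3
    · simpa [h1, h3] using three_eq (PySem.Str.upper amino) want_longer
    · have h3' : ¬((amino.length : Int) = 3) := by exact_mod_cast h3
      simp [h1, h3', loopNameA_eq]
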